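-- pv_equiv track=rewrite | github.com/miliar/Code_Jam_Webscraper | solutions_python/Problem_96/460.py | solve
-- ===== SOURCE A (Python) =====
-- def solve(scores):
--     N = scores[0]
--     S = scores[1]
--     p = scores[2]
--     seuil = 3*p - 2
--     ok = 0
--     for score in scores[3:]:
--         if score < p:
--             continue
--         elif score >= seuil:
--             ok += 1
--         elif score >= seuil - 2 and S > 0:
--             ok += 1
--             S -= 1
--     return ok
-- ===== SOURCE B (Python) =====
-- def solve(scores):
--     S = scores[1]
--     p = scores[2]
--     seuil = 3 * p - 2
--     definite = sum(1 for sc in scores[3:] if sc >= p and sc >= seuil)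
--     borderline = sum(1 for sc in scores[3:] if sc >= p and seuil - 2 <= sc < seuil)
--     return definite + min(max(S, 0), borderline)
-- ===== Notes on version B (the rewrite author's own statement) =====
-- stated objective: simpler
-- what changed: Replaces the stateful loop that decrements a surprise budget S inline with two declarative counts (definite and borderline qualifiers) combined by the closed-form allocation definite + min(max(S,0), borderline).
import Mathlib
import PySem

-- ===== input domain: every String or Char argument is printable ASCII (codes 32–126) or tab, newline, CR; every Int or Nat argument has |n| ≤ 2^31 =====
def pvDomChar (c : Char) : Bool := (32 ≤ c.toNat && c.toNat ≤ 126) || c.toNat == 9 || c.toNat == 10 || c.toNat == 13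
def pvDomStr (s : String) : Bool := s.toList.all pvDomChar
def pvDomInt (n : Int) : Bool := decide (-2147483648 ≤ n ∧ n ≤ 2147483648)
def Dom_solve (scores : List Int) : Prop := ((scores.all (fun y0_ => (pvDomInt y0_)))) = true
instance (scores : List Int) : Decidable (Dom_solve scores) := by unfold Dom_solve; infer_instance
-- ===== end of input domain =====

-- B replaces A's stateful budget-decrementing loop with two declarative counts
-- (definite / borderline) combined by a closed-form min allocation (objective: simpler).


-- ===== PORT A =====
-- the for-loop over scores[3:] carrying (ok, S)
def solveLoop (p seuil : Int) : List Int → Int → Int → Int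
  | [], ok, _S => ok
  | score :: rest, ok, S =>
    if score < p then solveLoop p seuil rest ok S
    else if score ≥ seuil then solveLoop p seuil rest (ok + 1) S
    else if score ≥ seuil - 2 ∧ S > 0 then solveLoop p seuil rest (ok + 1) (S - 1)
    else solveLoop p seuil rest ok S

def solve (scores : List Int) : Int :=
  match scores with
  | _N :: S :: p :: rest => solveLoop p (3 * p - 2) rest 0 S
  | _ => 0  -- scores[0]/[1]/[2] raise IndexError in Python; excluded by Pre_solve

-- ===== PORT B =====
def solve_alt (scores : List Int) : Int :=
  let S := PySem.List.pyGetD scores 1 0      -- index 1 of scores; the default is unreachable under Pre_solve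
  let p := PySem.List.pyGetD scores 2 0      -- index 2 of scores
  let rest := scores.drop 3                  -- the tail scores from index 3 on
  let seuil := 3 * p - 2
  let definite : Int := rest.countP (fun sc => decide (sc ≥ p ∧ sc ≥ seuil))
  let borderline : Int := rest.countP (fun sc => decide (sc ≥ p ∧ seuil - 2 ≤ sc ∧ sc < seuil))
  definite + min (max S 0) borderline

-- ===== PRECONDITION & SPEC =====
-- Python A reads the first three elements by index and raises IndexError on lists shorter than 3.
def Pre_solve (scores : List Int) : Prop := 3 ≤ scores.length
instance (scores : List Int) : Decidable (Pre_solve scores) := by unfold Pre_solve; infer_instance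
def pvWitness_solve : List Int := [2, 1, 2, 3, 5]

def Spec_solve (scores : List Int) (out : Int) : Prop := out = solve_alt scores
instance (scores : List Int) (out : Int) : Decidable (Spec_solve scores out) := by unfold Spec_solve; infer_instance

-- ===== CLAIM (what is proved, stated in full; the proofs are below) =====
def Claim_equal_solve : Prop := ∀ (scores : List Int), Dom_solve scores → Pre_solve scores → Spec_solve scores (solve scores)

-- ===== LEMMAS AND PROOFS =====
theorem pyGetD_one_cons3 (a b c : Int) (l : List Int) :
    PySem.List.pyGetD (a :: b :: c :: l) 1 0 = b := by
  rw [PySem.List.pyGetD_ofNat']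
  rfl

theorem pyGetD_two_cons3 (a b c : Int) (l : List Int) :
    PySem.List.pyGetD (a :: b :: c :: l) 2 0 = c := by
  rw [PySem.List.pyGetD_ofNat']
  rfl

-- loop invariant: the loop's result is ok + definite(l) + min(max S 0, borderline(l))
theorem solveLoop_eq (p seuil : Int) (l : List Int) : ∀ (ok S : Int),
    solveLoop p seuil l ok S =
      ok + (l.countP (fun sc => decide (sc ≥ p ∧ sc ≥ seuil)) : Int) +
        min (max S 0) (l.countP (fun sc => decide (sc ≥ p ∧ seuil - 2 ≤ sc ∧ sc < seuil)) : Int) := by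
  induction l with
  | nil => intro ok S; simp [solveLoop]
  | cons score rest ih =>
    intro ok S
    simp only [solveLoop, List.countP_cons]
    simp only [ih]
    simp only [decide_eq_true_eq]
    split_ifs <;> push_cast <;> omega

-- ===== VERDICT (by name: the statement is the Claim_ definition above) =====
theorem solve_spec : Claim_equal_solve := by
  intro scores _ hpre
  match scores with
  | _N :: S :: p :: rest =>
    unfold Spec_solve solve solve_alt
    simp only [solveLoop_eq, List.drop_succ_cons, List.drop_zero, pyGetD_one_cons3, pyGetD_two_cons3]
    ring
  | [] | [_] | [_, _] => simp [Pre_solve] at hpre
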